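-- pv_equiv track=rewrite | github.com/rawley-1/auctis | ask_refactor_working_copy.py | select_doctrine_leaders
-- ===== SOURCE A (Python) =====
-- from typing import Any, Dict, List, Optional, Tuple
--
-- def select_doctrine_leaders(
--     doctrine_buckets: Dict[str, List[Dict[str, Any]]],
--     max_cases_per_line: int = 3,
-- ) -> Dict[str, List[Dict[str, Any]]]:
--     selected: Dict[str, List[Dict[str, Any]]] = {}
--     preferred_roles = ["foundation", "supreme_refinement", "modern_application"]
--
--     for doctrine_line, bucket in doctrine_buckets.items():
--         chosen: List[Dict[str, Any]] = []
--         seen_sources = set()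
--
--         for role in preferred_roles:
--             for case in bucket:
--                 if case.get("role") == role and case.get("source") not in seen_sources:
--                     chosen.append(case)
--                     seen_sources.add(case.get("source"))
--                     break
--
--         for case in bucket:
--             if len(chosen) >= max_cases_per_line:
--                 break
--             if case.get("source") not in seen_sources:
--                 chosen.append(case)
--                 seen_sources.add(case.get("source"))
--
--         selected[doctrine_line] = chosen
--
--     return selected
-- ===== SOURCE B (Python) =====
-- def _take_unseen(needed, cases, seen):
--     if needed <= 0 or not cases:
--         return []
--     first, rest = cases[0], cases[1:]
--     src = first.get("source")
--     if src in seen: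
--         return _take_unseen(needed, rest, seen)
--     return [first] + _take_unseen(needed - 1, rest, seen | {src})
--
--
-- def select_doctrine_leaders(doctrine_buckets, max_cases_per_line=3):
--     preferred_roles = ["foundation", "supreme_refinement", "modern_application"]
--     selected = {}
--     for doctrine_line, bucket in doctrine_buckets.items():
--         by_role = {}
--         for case in bucket:
--             by_role.setdefault(case.get("role"), []).append(case)
--         chosen = []
--         seen_sources = set()
--         for role in preferred_roles:
--             for case in by_role.get(role, []):
--                 if case.get("source") not in seen_sources:
--                     chosen.append(case)
--                     seen_sources.add(case.get("source"))
--                     break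
--         chosen = chosen + _take_unseen(max_cases_per_line - len(chosen), bucket, seen_sources)
--         selected[doctrine_line] = chosen
--     return selected
-- ===== Notes on version B (the rewrite author's own statement) =====
-- stated objective: alternative
-- what changed: Phase 1 now builds a role->cases index of the bucket in one grouping pass and picks each preferred role's leader by walking its (order-preserving) group, instead of A's three full-bucket scans; the fill phase becomes a recursive 'take up to (max - len(chosen)) unseen-source cases' helper instead of A's break-on-length loop.
import Mathlib
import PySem

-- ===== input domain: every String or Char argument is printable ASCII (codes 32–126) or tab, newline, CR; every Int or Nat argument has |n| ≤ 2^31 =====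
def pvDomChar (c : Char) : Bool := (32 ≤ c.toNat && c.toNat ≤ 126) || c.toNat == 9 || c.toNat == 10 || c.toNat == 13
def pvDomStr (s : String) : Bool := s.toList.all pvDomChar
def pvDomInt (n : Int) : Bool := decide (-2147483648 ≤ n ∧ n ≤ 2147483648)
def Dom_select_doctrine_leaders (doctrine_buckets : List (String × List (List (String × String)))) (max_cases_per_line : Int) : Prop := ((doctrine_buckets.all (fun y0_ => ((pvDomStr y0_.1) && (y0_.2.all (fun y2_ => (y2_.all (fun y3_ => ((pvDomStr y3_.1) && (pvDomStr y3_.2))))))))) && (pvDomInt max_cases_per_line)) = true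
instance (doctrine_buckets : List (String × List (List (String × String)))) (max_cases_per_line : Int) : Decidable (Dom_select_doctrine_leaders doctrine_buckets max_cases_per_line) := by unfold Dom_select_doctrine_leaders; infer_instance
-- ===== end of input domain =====

-- B replaces A's three full-bucket scans (one per preferred role) by one grouping pass
-- (role → cases of that role, in bucket order) plus walks of the small per-role groups,
-- and replaces the break-on-length fill loop by a recursive "take up to n unseen-source
-- cases" helper.  Objective: alternative decomposition; equality of return values proved.

-- case.get(k) on a case dict (both Pythons access cases only this way)
def pvCaseGet (c : List (String × String)) (k : String) : Option String :=
  PySem.Dict.get? (PySem.Dict.ofList c) k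

-- ===== PORT A =====
-- Phase 1 of A: for each preferred role, scan the whole bucket for the first case of
-- that role whose source is unseen (the inner for/break is List.find?).
def pvPhase1A (bucket : List (List (String × String))) :
    List (List (String × String)) × PySem.Set (Option String) :=
  ["foundation", "supreme_refinement", "modern_application"].foldl (fun st role =>
    match bucket.find? (fun c =>
        (pvCaseGet c "role" == some role) &&
        !(PySem.Set.contains st.2 (pvCaseGet c "source"))) with
    | some c => (st.1 ++ [c], PySem.Set.add st.2 (pvCaseGet c "source"))
    | none => st) ([], [])

-- Phase 2 of A: walk the bucket, breaking once len(chosen) >= max_cases_per_line.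
def pvPhase2A (maxc : Int) :
    List (List (String × String)) → List (List (String × String)) →
    PySem.Set (Option String) → List (List (String × String))
  | [], chosen, _ => chosen
  | c :: rest, chosen, seen =>
    if maxc ≤ (chosen.length : Int) then chosen
    else if PySem.Set.contains seen (pvCaseGet c "source") then
      pvPhase2A maxc rest chosen seen
    else
      pvPhase2A maxc rest (chosen ++ [c]) (PySem.Set.add seen (pvCaseGet c "source"))

def select_doctrine_leaders (doctrine_buckets : List (String × List (List (String × String)))) (max_cases_per_line : Int) : List (String × List (List (String × String))) :=
  (doctrine_buckets.foldl (fun sel p =>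
    PySem.Dict.insert sel p.1
      (pvPhase2A max_cases_per_line p.2 (pvPhase1A p.2).1 (pvPhase1A p.2).2))
    PySem.Dict.empty).items

-- ===== PORT B =====
-- B: one grouping pass role → cases (bucket order preserved inside each group).
def pvGroupB (bucket : List (List (String × String))) :
    PySem.Dict (Option String) (List (List (String × String))) :=
  bucket.foldl (fun d c =>
    PySem.Dict.modify d (pvCaseGet c "role") [] (· ++ [c])) PySem.Dict.empty

-- B: recursive "take up to needed cases with unseen sources".
def pvTakeUnseen (needed : Int) :
    List (List (String × String)) → PySem.Set (Option String) → List (List (String × String))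
  | [], _ => []
  | c :: rest, seen =>
    if needed ≤ 0 then []
    else if PySem.Set.contains seen (pvCaseGet c "source") then
      pvTakeUnseen needed rest seen
    else
      c :: pvTakeUnseen (needed - 1) rest (PySem.Set.add seen (pvCaseGet c "source"))

def pvPhase1B (bucket : List (List (String × String))) :
    List (List (String × String)) × PySem.Set (Option String) :=
  ["foundation", "supreme_refinement", "modern_application"].foldl (fun st role =>
    match (PySem.Dict.getD (pvGroupB bucket) (some role) []).find? (fun c =>
        !(PySem.Set.contains st.2 (pvCaseGet c "source"))) with
    | some c => (st.1 ++ [c], PySem.Set.add st.2 (pvCaseGet c "source"))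
    | none => st) ([], [])

def select_doctrine_leaders_alt (doctrine_buckets : List (String × List (List (String × String)))) (max_cases_per_line : Int) : List (String × List (List (String × String))) :=
  (doctrine_buckets.foldl (fun sel p =>
    PySem.Dict.insert sel p.1
      ((pvPhase1B p.2).1 ++
        pvTakeUnseen (max_cases_per_line - ((pvPhase1B p.2).1.length : Int)) p.2
          (pvPhase1B p.2).2))
    PySem.Dict.empty).items

-- ===== PRECONDITION & SPEC =====
def Spec_select_doctrine_leaders (doctrine_buckets : List (String × List (List (String × String)))) (max_cases_per_line : Int) (out : List (String × List (List (String × String)))) : Prop := out = select_doctrine_leaders_alt doctrine_buckets max_cases_per_line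
instance (doctrine_buckets : List (String × List (List (String × String)))) (max_cases_per_line : Int) (out : List (String × List (List (String × String)))) : Decidable (Spec_select_doctrine_leaders doctrine_buckets max_cases_per_line out) := by unfold Spec_select_doctrine_leaders; infer_instance

-- ===== CLAIM (what is proved, stated in full; the proofs are below) =====
def Claim_equal_select_doctrine_leaders : Prop := ∀ (doctrine_buckets : List (String × List (List (String × String)))) (max_cases_per_line : Int), Dom_select_doctrine_leaders doctrine_buckets max_cases_per_line → Spec_select_doctrine_leaders doctrine_buckets max_cases_per_line (select_doctrine_leaders doctrine_buckets max_cases_per_line)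

-- ===== LEMMAS AND PROOFS =====

-- B's per-role group is A's role filter of the bucket, in bucket order.
theorem pvGroup_getD (bucket : List (List (String × String))) (role : String) :
    PySem.Dict.getD (pvGroupB bucket) (some role) []
      = bucket.filter (fun c => pvCaseGet c "role" == some role) := by
  unfold pvGroupB
  have h : bucket.foldl (fun d c =>
        PySem.Dict.modify d (pvCaseGet c "role") [] (· ++ [c])) PySem.Dict.empty
      = (bucket.map (fun c => (pvCaseGet c "role", c))).foldl
          (fun d p => PySem.Dict.modify d p.1 [] (· ++ [p.2])) PySem.Dict.empty := by
    rw [List.foldl_map]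
  rw [h, PySem.Dict.getD_foldl_modify_append]
  simp [List.filter_map, Function.comp_def]

-- B's find? on the per-role group equals A's find? on the whole bucket.
theorem pvFind_group (bucket : List (List (String × String))) (role : String)
    (seen : PySem.Set (Option String)) :
    (PySem.Dict.getD (pvGroupB bucket) (some role) []).find?
        (fun c => !(PySem.Set.contains seen (pvCaseGet c "source")))
      = bucket.find? (fun c =>
          (pvCaseGet c "role" == some role) &&
          !(PySem.Set.contains seen (pvCaseGet c "source"))) := by
  rw [pvGroup_getD, List.find?_filter]
  congr 1
  funext a
  rw [Bool.beq_eq_decide_eq]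
  simp

theorem pvPhase1_eq (bucket : List (List (String × String))) :
    pvPhase1B bucket = pvPhase1A bucket := by
  unfold pvPhase1B pvPhase1A
  simp only [List.foldl_cons, List.foldl_nil, pvFind_group]

-- A's fill loop appends exactly B's "take up to (max - len chosen) unseen" suffix.
theorem pvPhase2_eq (maxc : Int) (bucket : List (List (String × String)))
    (chosen : List (List (String × String))) (seen : PySem.Set (Option String)) :
    pvPhase2A maxc bucket chosen seen
      = chosen ++ pvTakeUnseen (maxc - (chosen.length : Int)) bucket seen := by
  induction bucket generalizing chosen seen with
  | nil => simp [pvPhase2A, pvTakeUnseen]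
  | cons c rest ih =>
    by_cases h : maxc ≤ (chosen.length : Int)
    · have h0 : maxc - (chosen.length : Int) ≤ 0 := by omega
      simp [pvPhase2A, pvTakeUnseen, h, h0]
    · have h' : ¬ (maxc - (chosen.length : Int) ≤ 0) := by omega
      by_cases hs : pvCaseGet c "source" ∈ seen
      · simp [pvPhase2A, pvTakeUnseen, h, h', hs, ih]
      · have hlen : maxc - ((chosen.length : Int) + 1)
            = maxc - (chosen.length : Int) - 1 := by omega
        simp [pvPhase2A, pvTakeUnseen, h, h', hs, ih, hlen]

-- ===== VERDICT (by name: the statement is the Claim_ definition above) =====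
theorem select_doctrine_leaders_spec : Claim_equal_select_doctrine_leaders := by
  intro db maxc _
  unfold Spec_select_doctrine_leaders select_doctrine_leaders select_doctrine_leaders_alt
  have h : (fun (sel : PySem.Dict String (List (List (String × String))))
        (p : String × List (List (String × String))) =>
      PySem.Dict.insert sel p.1
        (pvPhase2A maxc p.2 (pvPhase1A p.2).1 (pvPhase1A p.2).2))
      = (fun sel p =>
      PySem.Dict.insert sel p.1
        ((pvPhase1B p.2).1 ++
          pvTakeUnseen (maxc - ((pvPhase1B p.2).1.length : Int)) p.2 (pvPhase1B p.2).2)) := by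
    funext sel p
    rw [pvPhase2_eq, pvPhase1_eq]
  rw [h]
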